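-- pv_equiv track=rewrite | github.com/funkelab/funtracks | src/funtracks/import_export/_name_mapping.py | _match_exact
-- ===== SOURCE A (Python) =====
-- def _match_exact(
--     target_fields: list[str],
--     importable_props: list[str],
--     mapping: dict[str, str],
-- ) -> list[str]:
--     """Find exact matches between target fields and importable properties.
--
--     Args:
--         target_fields: List of field names to match (e.g., ["time", "x", "y"])
--         importable_props: List of property names available in source data
--         mapping: Mapping dict to update with matches (modified in place)
--
--     Returns:
--         List of properties that weren't matched in this step
--     """
--     props_left = importable_props.copy()
--
--     for field in target_fields:
--         if field in mapping:
--             continue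
--         if field in props_left:
--             mapping[field] = field
--             props_left.remove(field)
--
--     return props_left
-- ===== SOURCE B (Python) =====
-- def _match_exact(
--     target_fields: list[str],
--     importable_props: list[str],
--     mapping: dict[str, str],
-- ) -> list[str]:
--     # Two-phase: first decide which fields match (against a membership set),
--     # then build the leftovers in a single filtering pass that drops exactly
--     # one occurrence of each matched prop.  Same in-place mapping update as A.
--     available = set(importable_props)
--     matched = set()
--     for field in target_fields:
--         if field not in mapping and field in available:
--             mapping[field] = field
--             matched.add(field)
--     remaining = set(matched)
--     out = []
--     for prop in importable_props:
--         if prop in remaining: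
--             remaining.discard(prop)
--         else:
--             out.append(prop)
--     return out
-- ===== Notes on version B (the rewrite author's own statement) =====
-- stated objective: simpler
-- what changed: Instead of mutating a copy of importable_props with list.remove inside the matching loop, B first computes the matched set in one pass and then builds the leftover list in a second filtering pass that skips one occurrence of each matched prop.
import Mathlib
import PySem

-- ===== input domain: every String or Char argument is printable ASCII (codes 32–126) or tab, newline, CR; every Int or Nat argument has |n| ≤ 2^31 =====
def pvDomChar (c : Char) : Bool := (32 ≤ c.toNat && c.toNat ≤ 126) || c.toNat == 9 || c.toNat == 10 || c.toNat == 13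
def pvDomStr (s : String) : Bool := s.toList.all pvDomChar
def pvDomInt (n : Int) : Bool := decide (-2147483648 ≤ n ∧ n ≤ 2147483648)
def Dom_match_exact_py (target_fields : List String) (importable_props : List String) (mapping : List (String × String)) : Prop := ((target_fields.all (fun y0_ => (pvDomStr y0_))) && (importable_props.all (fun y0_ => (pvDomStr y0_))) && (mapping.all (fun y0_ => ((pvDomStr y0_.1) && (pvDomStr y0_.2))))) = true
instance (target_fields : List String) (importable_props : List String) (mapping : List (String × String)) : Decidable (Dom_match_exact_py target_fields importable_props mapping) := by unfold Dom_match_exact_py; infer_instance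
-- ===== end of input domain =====

-- B restructures A's single in-place-removal loop into a two-phase pass (collect matched set, then filter);
-- both versions also update `mapping` in place identically in Python — the theorem is about the RETURN value.

-- ===== PORT A =====
-- the loop over target_fields, carrying the mapping and props_left
def matchExactLoopA : List String → PySem.Dict String String → List String → List String
  | [], _, propsLeft => propsLeft
  | f :: fs, m, propsLeft =>
    if m.contains f then matchExactLoopA fs m propsLeft
    else if propsLeft.contains f then
      matchExactLoopA fs (m.insert f f) ((PySem.List.remove? propsLeft f).getD propsLeft)
    else matchExactLoopA fs m propsLeft

def match_exact_py (target_fields : List String) (importable_props : List String) (mapping : List (String × String)) : List String :=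
  matchExactLoopA target_fields (PySem.Dict.ofList mapping) importable_props

-- ===== PORT B =====
-- phase 1: collect the matched set (mapping carried along, as Source B updates it in place)
def collectMatchedB : List String → PySem.Dict String String → PySem.Set String → PySem.Set String → PySem.Set String
  | [], _, _, matched => matched
  | f :: fs, m, avail, matched =>
    if !m.contains f && PySem.Set.contains avail f then
      collectMatchedB fs (m.insert f f) avail (PySem.Set.add matched f)
    else collectMatchedB fs m avail matched

-- phase 2: filter props, dropping one occurrence of each element of `remaining`
def filterOnceB : List String → PySem.Set String → List String
  | [], _ => []
  | p :: ps, remaining =>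
    if PySem.Set.contains remaining p then filterOnceB ps (PySem.Set.discard remaining p)
    else p :: filterOnceB ps remaining

def match_exact_py_alt (target_fields : List String) (importable_props : List String) (mapping : List (String × String)) : List String :=
  filterOnceB importable_props
    (collectMatchedB target_fields (PySem.Dict.ofList mapping) (PySem.Set.ofList importable_props) PySem.Set.empty)

-- ===== PRECONDITION & SPEC =====
def Spec_match_exact_py (target_fields : List String) (importable_props : List String) (mapping : List (String × String)) (out : List String) : Prop := out = match_exact_py_alt target_fields importable_props mapping
instance (target_fields : List String) (importable_props : List String) (mapping : List (String × String)) (out : List String) : Decidable (Spec_match_exact_py target_fields importable_props mapping out) := by unfold Spec_match_exact_py; infer_instance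

-- ===== CLAIM (what is proved, stated in full; the proofs are below) =====
def Claim_equal_match_exact_py : Prop := ∀ (target_fields : List String) (importable_props : List String) (mapping : List (String × String)), Dom_match_exact_py target_fields importable_props mapping → Spec_match_exact_py target_fields importable_props mapping (match_exact_py target_fields importable_props mapping)

-- ===== LEMMAS AND PROOFS =====

-- filterOnceB only looks at the membership predicate of its set argument
theorem filterOnceB_congr (props : List String) (r₁ r₂ : PySem.Set String)
    (h : ∀ x, x ∈ r₁ ↔ x ∈ r₂) : filterOnceB props r₁ = filterOnceB props r₂ := by
  induction props generalizing r₁ r₂ with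
  | nil => rfl
  | cons p ps ih =>
    have hc : PySem.Set.contains r₁ p = PySem.Set.contains r₂ p := by
      by_cases hp : p ∈ r₂
      · have h1 : PySem.Set.contains r₁ p = true := (PySem.Set.contains_iff _ _).mpr ((h p).mpr hp)
        have h2 : PySem.Set.contains r₂ p = true := (PySem.Set.contains_iff _ _).mpr hp
        rw [h1, h2]
      · have h1 : PySem.Set.contains r₁ p ≠ true := fun hh => hp ((h p).mp ((PySem.Set.contains_iff _ _).mp hh))
        have h2 : PySem.Set.contains r₂ p ≠ true := fun hh => hp ((PySem.Set.contains_iff _ _).mp hh)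
        simp only [Bool.not_eq_true] at h1 h2; rw [h1, h2]
    simp only [filterOnceB, hc]
    split
    · exact ih _ _ (fun x => by simp only [PySem.Set.mem_discard, h x])
    · rw [ih _ _ h]

-- membership in the filtered list, for an element not scheduled for removal
theorem mem_filterOnceB (props : List String) (r : PySem.Set String) (f : String)
    (hf : f ∉ r) : f ∈ filterOnceB props r ↔ f ∈ props := by
  induction props generalizing r with
  | nil => simp [filterOnceB]
  | cons p ps ih =>
    simp only [filterOnceB]
    split
    · rename_i hc
      have hp : p ∈ r := (PySem.Set.contains_iff _ _).mp hc
      have hne : f ≠ p := fun h => hf (h ▸ hp)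
      rw [ih _ (fun h => hf ((PySem.Set.mem_discard _ _ _).mp h).1)]
      simp [List.mem_cons, hne]
    · rename_i hc
      simp only [List.mem_cons]
      constructor
      · rintro (h | h); · exact Or.inl h
        · exact Or.inr ((ih r hf).mp h)
      · rintro (h | h); · exact Or.inl h
        · exact Or.inr ((ih r hf).mpr h)

-- removing the first occurrence of f after filtering = filtering with f added to the set
theorem erase_filterOnceB (props : List String) (r : PySem.Set String) (f : String)
    (hf : f ∉ r) : filterOnceB props (PySem.Set.add r f) = (filterOnceB props r).erase f := by
  induction props generalizing r with
  | nil => rfl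
  | cons p ps ih =>
    by_cases hpf : p = f
    · subst hpf
      have hc1 : PySem.Set.contains (PySem.Set.add r p) p = true :=
        (PySem.Set.contains_iff _ _).mpr ((PySem.Set.mem_add _ _ _).mpr (Or.inr rfl))
      have hc2 : PySem.Set.contains r p = false := by
        by_cases h : PySem.Set.contains r p = true
        · exact absurd ((PySem.Set.contains_iff _ _).mp h) hf
        · simpa using h
      simp only [filterOnceB, hc1, hc2, if_true, Bool.false_eq_true, if_false]
      rw [List.erase_cons_head]
      apply filterOnceB_congr
      intro x
      simp only [PySem.Set.mem_discard, PySem.Set.mem_add]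
      constructor
      · rintro ⟨h1 | h1, h2⟩; · exact h1
        · exact absurd h1 h2
      · intro hx; exact ⟨Or.inl hx, fun h => hf (h ▸ hx)⟩
    · by_cases hpr : p ∈ r
      · have hc1 : PySem.Set.contains (PySem.Set.add r f) p = true :=
          (PySem.Set.contains_iff _ _).mpr ((PySem.Set.mem_add _ _ _).mpr (Or.inl hpr))
        have hc2 : PySem.Set.contains r p = true := (PySem.Set.contains_iff _ _).mpr hpr
        simp only [filterOnceB, hc1, hc2, if_true]
        have hstep : filterOnceB ps (PySem.Set.discard (PySem.Set.add r f) p)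
            = filterOnceB ps (PySem.Set.add (PySem.Set.discard r p) f) := by
          apply filterOnceB_congr
          intro x
          simp only [PySem.Set.mem_discard, PySem.Set.mem_add]
          constructor
          · rintro ⟨h1 | h1, h2⟩; · exact Or.inl ⟨h1, h2⟩
            · exact Or.inr h1
          · rintro (⟨h1, h2⟩ | h1); · exact ⟨Or.inl h1, h2⟩
            · exact ⟨Or.inr h1, fun h => hpf (h1 ▸ h).symm⟩
        rw [hstep, ih _ (fun h => hf ((PySem.Set.mem_discard _ _ _).mp h).1)]
      · have hc1 : PySem.Set.contains (PySem.Set.add r f) p = false := by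
          by_cases h : PySem.Set.contains (PySem.Set.add r f) p = true
          · rcases (PySem.Set.mem_add _ _ _).mp ((PySem.Set.contains_iff _ _).mp h) with h1 | h1
            · exact absurd h1 hpr
            · exact absurd h1 hpf
          · simpa using h
        have hc2 : PySem.Set.contains r p = false := by
          by_cases h : PySem.Set.contains r p = true
          · exact absurd ((PySem.Set.contains_iff _ _).mp h) hpr
          · simpa using h
        simp only [filterOnceB, hc1, hc2, Bool.false_eq_true, if_false]
        rw [ih r hf, List.erase_cons_tail]
        simp [hpf]

-- filtering by the empty set is the identity
theorem filterOnceB_empty (props : List String) : filterOnceB props PySem.Set.empty = props := by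
  induction props with
  | nil => rfl
  | cons p ps ih =>
    show filterOnceB (p :: ps) [] = p :: ps
    simp only [filterOnceB, PySem.Set.contains, List.contains_nil, Bool.false_eq_true, if_false]
    exact congrArg (p :: ·) ih

-- main invariant: A's loop state props_left is the filtered original list
theorem matchExact_invariant (fs : List String) (m : PySem.Dict String String)
    (r : PySem.Set String) (props0 : List String)
    (hsub : ∀ x ∈ r, m.contains x = true) :
    matchExactLoopA fs m (filterOnceB props0 r)
      = filterOnceB props0 (collectMatchedB fs m (PySem.Set.ofList props0) r) := by
  induction fs generalizing m r with
  | nil => rfl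
  | cons f fs ih =>
    by_cases hm : m.contains f = true
    · simp only [matchExactLoopA, collectMatchedB, hm, if_true, Bool.not_true, Bool.false_and,
        Bool.false_eq_true, if_false]
      exact ih m r hsub
    · have hfr : f ∉ r := fun h => hm (hsub f h)
      have hm' : m.contains f = false := by simpa using hm
      by_cases hp : f ∈ props0
      · have hcf : (filterOnceB props0 r).contains f = true := by
          simp only [List.contains_eq_mem, decide_eq_true_eq]
          exact (mem_filterOnceB props0 r f hfr).mpr hp
        have hav : PySem.Set.contains (PySem.Set.ofList props0) f = true :=
          (PySem.Set.contains_iff _ _).mpr ((PySem.Set.mem_ofList _ _).mpr hp)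
        have hrem : PySem.List.remove? (filterOnceB props0 r) f
            = some ((filterOnceB props0 r).erase f) :=
          PySem.List.remove?_eq_some_erase _ _ ((mem_filterOnceB props0 r f hfr).mpr hp)
        simp only [matchExactLoopA, collectMatchedB, hm', hav, Bool.false_eq_true, if_false,
          hcf, if_true, Bool.not_false, Bool.true_and, hrem, Option.getD_some]
        rw [← erase_filterOnceB props0 r f hfr]
        apply ih
        intro x hx
        rcases (PySem.Set.mem_add _ _ _).mp hx with h | h
        · rw [PySem.Dict.contains_insert]
          simp [hsub x h]
        · subst h; exact PySem.Dict.contains_insert_self _ _ _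
      · have hcf : (filterOnceB props0 r).contains f = false := by
          simp only [List.contains_eq_mem, decide_eq_false_iff_not]
          exact fun h => hp ((mem_filterOnceB props0 r f hfr).mp h)
        have hav : PySem.Set.contains (PySem.Set.ofList props0) f = false := by
          by_cases h : PySem.Set.contains (PySem.Set.ofList props0) f = true
          · exact absurd ((PySem.Set.mem_ofList _ _).mp ((PySem.Set.contains_iff _ _).mp h)) hp
          · simpa using h
        simp only [matchExactLoopA, collectMatchedB, hm', hav, Bool.false_eq_true, if_false,
          hcf, Bool.and_false]
        exact ih m r hsub

-- ===== VERDICT (by name: the statement is the Claim_ definition above) =====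
theorem match_exact_py_spec : Claim_equal_match_exact_py := by
  intro target_fields importable_props mapping _
  unfold Spec_match_exact_py match_exact_py match_exact_py_alt
  have h := matchExact_invariant target_fields (PySem.Dict.ofList mapping) PySem.Set.empty
    importable_props (fun x hx => absurd hx (List.not_mem_nil))
  rw [filterOnceB_empty importable_props] at h
  exact h
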